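-- pv_equiv track=rewrite | github.com/csimong/rosetta_cm_utils | get_span_file.py | extract_topcons_block
-- ===== SOURCE A (Python) =====
-- from typing import Optional, Tuple, List
--
-- def extract_topcons_block(text: str) -> str:
--     """
--     Keep from file start through:
--       TOPCONS predicted topology:
--       <topology line(s) until blank line>
--     Then stop.
--     """
--     lines = text.splitlines(True)  # keep line endings
--     kept: List[str] = []
--
--     i = 0
--     while i < len(lines):
--         kept.append(lines[i])
--         if lines[i].startswith("TOPCONS predicted topology:"):
--             # include following lines until the first blank line after the topology
--             j = i + 1
--             while j < len(lines):
--                 kept.append(lines[j])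
--                 if lines[j].strip() == "":
--                     break
--                 j += 1
--             break
--         i += 1
--
--     return "".join(kept)
-- ===== SOURCE B (Python) =====
-- def extract_topcons_block(text: str) -> str:
--     """Index-based: find marker line, then first blank after it; slice once."""
--     lines = text.splitlines(True)
--     marker = "TOPCONS predicted topology:"
--     m = next((i for i, l in enumerate(lines) if l.startswith(marker)), None)
--     if m is None:
--         return text
--     b = next((j for j in range(m + 1, len(lines)) if lines[j].strip() == ""), None)
--     if b is None:
--         return "".join(lines)
--     return "".join(lines[:b + 1])
-- ===== Notes on version B (the rewrite author's own statement) =====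
-- stated objective: simpler
-- what changed: Replaces A's nested while loops that append lines one by one into an accumulator with two first-index searches (marker line, then first blank line after it) followed by a single slice-and-join, returning text unchanged when the marker is absent.
import Mathlib
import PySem

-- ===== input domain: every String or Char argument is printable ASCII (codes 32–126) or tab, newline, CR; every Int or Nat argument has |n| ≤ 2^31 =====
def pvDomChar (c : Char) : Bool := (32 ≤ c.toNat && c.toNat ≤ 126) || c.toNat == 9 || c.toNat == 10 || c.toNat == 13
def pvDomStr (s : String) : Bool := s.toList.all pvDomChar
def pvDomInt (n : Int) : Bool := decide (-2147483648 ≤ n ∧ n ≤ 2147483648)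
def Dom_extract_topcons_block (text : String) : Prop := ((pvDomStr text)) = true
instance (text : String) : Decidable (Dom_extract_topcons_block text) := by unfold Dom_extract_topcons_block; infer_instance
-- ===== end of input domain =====

-- B replaces A's nested append loops by two first-index searches and one slice; objective: simpler.

-- text.splitlines(True) (keepends) is not in PySem; ported by hand, exact on the Dom alphabet
-- (the only line breaks in Dom are '\n', '\r' and '\r\n', exactly what Python splits on there).
def pvSplitK : List Char → List (List Char)
  | [] => []
  | '\n' :: rest => ['\n'] :: pvSplitK rest
  | '\r' :: '\n' :: rest => ['\r', '\n'] :: pvSplitK rest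
  | '\r' :: rest => ['\r'] :: pvSplitK rest
  | c :: rest =>
    match pvSplitK rest with
    | [] => [[c]]
    | l :: ls => (c :: l) :: ls

def pvMarker : List Char := "TOPCONS predicted topology:".toList

-- ===== PORT A =====
-- inner while loop of A: append lines[j], break at the first blank line
def pvTakeUntilBlank : List (List Char) → List (List Char)
  | [] => []
  | l :: rest => l :: (if (PySem.Chars.strip l).isEmpty then [] else pvTakeUntilBlank rest)

-- outer while loop of A: append lines[i], on the marker line run the inner loop and break
def pvGoA : List (List Char) → List (List Char)
  | [] => []
  | l :: rest =>
    l :: (if PySem.Chars.startswith l pvMarker then pvTakeUntilBlank rest else pvGoA rest)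

def extract_topcons_block (text : String) : String :=
  String.ofList (PySem.Chars.join [] (pvGoA (pvSplitK text.toList)))

-- ===== PORT B =====
def extract_topcons_block_alt (text : String) : String :=
  let lines := pvSplitK text.toList
  match List.findIdx? (fun l => PySem.Chars.startswith l pvMarker) lines with
  | none => text
  | some m =>
    match List.findIdx? (fun l => (PySem.Chars.strip l).isEmpty) (lines.drop (m + 1)) with
    | none => String.ofList (PySem.Chars.join [] lines)
    | some k => String.ofList (PySem.Chars.join [] (lines.take (m + 1 + k + 1)))

-- ===== PRECONDITION & SPEC =====
def Spec_extract_topcons_block (text : String) (out : String) : Prop := out = extract_topcons_block_alt text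
instance (text : String) (out : String) : Decidable (Spec_extract_topcons_block text out) := by unfold Spec_extract_topcons_block; infer_instance

-- ===== CLAIM (what is proved, stated in full; the proofs are below) =====
def Claim_equal_extract_topcons_block : Prop := ∀ (text : String), Dom_extract_topcons_block text → Spec_extract_topcons_block text (extract_topcons_block text)

-- ===== LEMMAS AND PROOFS =====

theorem join_nil_eq_flatten (l : List (List Char)) : PySem.Chars.join [] l = l.flatten := by
  induction l with
  | nil => rfl
  | cons x xs ih =>
    cases xs with
    | nil => simp [PySem.Chars.join, List.intercalate]
    | cons y ys =>
      have := ih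
      simp [PySem.Chars.join, List.intercalate, List.intersperse] at this ⊢
      simpa [List.intercalate, List.intersperse] using this

theorem flatten_pvSplitK (cs : List Char) : (pvSplitK cs).flatten = cs := by
  induction cs using pvSplitK.induct <;> simp_all [pvSplitK]

theorem takeUntilBlank_eq (rest : List (List Char)) :
    pvTakeUntilBlank rest =
      match List.findIdx? (fun l => (PySem.Chars.strip l).isEmpty) rest with
      | none => rest
      | some k => rest.take (k + 1) := by
  induction rest with
  | nil => rfl
  | cons l rs ih =>
    by_cases h : (PySem.Chars.strip l).isEmpty
    · simp [pvTakeUntilBlank, h, List.findIdx?_cons]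
    · simp only [pvTakeUntilBlank, h, List.findIdx?_cons, Bool.false_eq_true, if_false, ih]
      cases hfi : List.findIdx? (fun l => (PySem.Chars.strip l).isEmpty) rs with
      | none => simp
      | some k =>
        have hk : k + 1 + 1 = k + 2 := by omega
        simp [hk, List.take_succ_cons]

theorem goA_eq (lines : List (List Char)) :
    pvGoA lines =
      match List.findIdx? (fun l => PySem.Chars.startswith l pvMarker) lines with
      | none => lines
      | some m =>
        match List.findIdx? (fun l => (PySem.Chars.strip l).isEmpty) (lines.drop (m + 1)) with
        | none => lines
        | some k => lines.take (m + 1 + k + 1) := by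
  induction lines with
  | nil => rfl
  | cons l rs ih =>
    by_cases h : PySem.Chars.startswith l pvMarker
    · simp only [pvGoA, h, if_true, List.findIdx?_cons, List.drop_succ_cons, List.drop_zero,
        takeUntilBlank_eq]
      cases hfi : List.findIdx? (fun l => (PySem.Chars.strip l).isEmpty) rs with
      | none => simp
      | some k =>
        have hk : 0 + 1 + k + 1 = k + 1 + 1 := by omega
        simp [hk, List.take_succ_cons]
    · simp only [pvGoA, h, List.findIdx?_cons, Bool.false_eq_true, if_false, ih]
      cases hfi : List.findIdx? (fun l => PySem.Chars.startswith l pvMarker) rs with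
      | none => simp
      | some m =>
        simp only [Option.map_some]
        simp only [List.drop_succ_cons]
        cases hfj : List.findIdx? (fun l => (PySem.Chars.strip l).isEmpty) (rs.drop (m + 1)) with
        | none => simp
        | some k =>
          have hk : m + 1 + 1 + k + 1 = (m + 1 + k + 1) + 1 := by omega
          simp [hk, List.take_succ_cons]

-- ===== VERDICT (by name: the statement is the Claim_ definition above) =====
theorem extract_topcons_block_spec : Claim_equal_extract_topcons_block := by
  intro text _
  unfold Spec_extract_topcons_block extract_topcons_block extract_topcons_block_alt
  simp only [goA_eq]
  cases hfi : List.findIdx? (fun l => PySem.Chars.startswith l pvMarker) (pvSplitK text.toList) with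
  | none => simp [join_nil_eq_flatten, flatten_pvSplitK]
  | some m =>
    show String.ofList (PySem.Chars.join []
        (match List.findIdx? (fun l => (PySem.Chars.strip l).isEmpty)
            (List.drop (m + 1) (pvSplitK text.toList)) with
        | none => pvSplitK text.toList
        | some k => List.take (m + 1 + k + 1) (pvSplitK text.toList))) =
      match List.findIdx? (fun l => (PySem.Chars.strip l).isEmpty)
          (List.drop (m + 1) (pvSplitK text.toList)) with
      | none => String.ofList (PySem.Chars.join [] (pvSplitK text.toList))
      | some k => String.ofList (PySem.Chars.join [] (List.take (m + 1 + k + 1) (pvSplitK text.toList)))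
    cases hfj : List.findIdx? (fun l => (PySem.Chars.strip l).isEmpty)
        (List.drop (m + 1) (pvSplitK text.toList)) with
    | none => rfl
    | some k => rfl
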